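-- pv_equiv track=rewrite | github.com/steentj/dho | create_embeddings/tests/test_start_page_drift_word_overlap.py | _build_full_tokens_and_markers
-- ===== SOURCE A (Python) =====
-- def _build_full_tokens_and_markers(pages: dict[int, str]) -> tuple[list[str], list[tuple[int, int]]]:
--     """Replicate process_document concatenation and build page markers for ALL pages (including empty)."""
--     full_tokens: list[str] = []
--     markers: list[tuple[int, int]] = []
--     current_pos = 0
--     for p in sorted(pages.keys()):
--         # marker at the start of every page, even if empty
--         markers.append((current_pos, p))
--         txt = pages[p].strip()
--         if txt:
--             words = txt.split()
--             full_tokens.extend(words)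
--             current_pos += len(words)
--     return full_tokens, markers
-- ===== SOURCE B (Python) =====
-- def _prefix_positions(counts):
--     positions = []
--     total = 0
--     for c in counts:
--         positions.append(total)
--         total += c
--     return positions
--
--
-- def _build_full_tokens_and_markers(pages: dict[int, str]) -> tuple[list[str], list[tuple[int, int]]]:
--     keys = sorted(pages)
--     word_lists = [pages[p].strip().split() for p in keys]
--     full_tokens = [w for wl in word_lists for w in wl]
--     markers = list(zip(_prefix_positions([len(wl) for wl in word_lists]), keys))
--     return full_tokens, markers
-- ===== Notes on version B (the rewrite author's own statement) =====
-- stated objective: alternative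
-- what changed: Replaces A's single interleaved loop that mutates three accumulators (tokens, markers, running position) with a precompute-then-zip decomposition: sorted keys, a table of per-page word lists, a flatten for the tokens, and an exclusive prefix-sum of the word counts zipped with the keys for the markers.
import Mathlib
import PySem

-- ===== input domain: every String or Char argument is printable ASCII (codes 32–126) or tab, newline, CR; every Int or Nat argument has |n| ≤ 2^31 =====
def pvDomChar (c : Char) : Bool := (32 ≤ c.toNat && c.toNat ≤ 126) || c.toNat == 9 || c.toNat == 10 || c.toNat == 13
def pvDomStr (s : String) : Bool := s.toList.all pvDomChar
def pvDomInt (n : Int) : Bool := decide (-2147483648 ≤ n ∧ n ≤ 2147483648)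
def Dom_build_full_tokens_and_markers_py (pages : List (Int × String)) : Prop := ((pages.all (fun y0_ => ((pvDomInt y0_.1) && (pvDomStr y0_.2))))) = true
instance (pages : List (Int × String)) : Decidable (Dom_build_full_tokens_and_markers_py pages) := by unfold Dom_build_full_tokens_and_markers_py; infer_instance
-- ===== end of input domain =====

-- B replaces A's single interleaved accumulator loop by a precompute-then-zip decomposition
-- (per-page word lists, a flatten, and an exclusive prefix-sum of the counts); objective: alternative.

-- ===== PORT A =====
-- the single loop over the sorted keys, carrying (full_tokens, markers, current_pos)
def pvStepA (d : PySem.Dict Int String) (st : List String × List (Int × Int) × Int) (p : Int) :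
    List String × List (Int × Int) × Int :=
  let mk := st.2.1 ++ [(st.2.2, p)]
  -- pages[p]: p comes from pages.keys(), so the lookup always succeeds; getD "" is exact here
  let txt := PySem.Str.strip ((d.get? p).getD "")
  if txt ≠ "" then
    let words := PySem.Str.split₀ txt
    (st.1 ++ words, mk, st.2.2 + (words.length : Int))
  else (st.1, mk, st.2.2)

def build_full_tokens_and_markers_py (pages : List (Int × String)) : List String × (List (Int × Int)) :=
  let st := (PySem.List.sorted (PySem.Dict.keys ⟨pages⟩) (fun k => k)).foldl (pvStepA ⟨pages⟩) ([], [], 0)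
  (st.1, st.2.1)
-- ===== PORT B =====
-- _prefix_positions: exclusive prefix sums of counts (append loop carrying the running total)
def pvPrefixPositions : List Int → Int → List Int
  | [], _ => []
  | c :: cs, total => total :: pvPrefixPositions cs (total + c)

def build_full_tokens_and_markers_py_alt (pages : List (Int × String)) : List String × (List (Int × Int)) :=
  let keys := PySem.List.sorted (PySem.Dict.keys (⟨pages⟩ : PySem.Dict Int String)) (fun k => k)
  let wordLists := keys.map (fun p => PySem.Str.split₀ (PySem.Str.strip ((PySem.Dict.get? ⟨pages⟩ p).getD "")))
  let fullTokens := wordLists.flatMap (fun wl => wl)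
  let markers := (pvPrefixPositions (wordLists.map (fun wl => (wl.length : Int))) 0).zip keys
  (fullTokens, markers)

-- ===== PRECONDITION & SPEC =====
def Spec_build_full_tokens_and_markers_py (pages : List (Int × String)) (out : List String × (List (Int × Int))) : Prop := out = build_full_tokens_and_markers_py_alt pages
instance (pages : List (Int × String)) (out : List String × (List (Int × Int))) : Decidable (Spec_build_full_tokens_and_markers_py pages out) := by unfold Spec_build_full_tokens_and_markers_py; infer_instance

-- ===== CLAIM (what is proved, stated in full; the proofs are below) =====
def Claim_equal_build_full_tokens_and_markers_py : Prop := ∀ (pages : List (Int × String)), Dom_build_full_tokens_and_markers_py pages → Spec_build_full_tokens_and_markers_py pages (build_full_tokens_and_markers_py pages)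

-- ===== LEMMAS AND PROOFS =====

-- the per-key word list both programs derive from the dict
def pvWords (d : PySem.Dict Int String) (p : Int) : List String :=
  PySem.Str.split₀ (PySem.Str.strip ((d.get? p).getD ""))

-- A's loop body always extends by pvWords d p (the empty-text branch adds nothing, since ''.split() = [])
lemma pvStep_eq (d : PySem.Dict Int String) (st : List String × List (Int × Int) × Int) (p : Int) :
    pvStepA d st p
    = (st.1 ++ pvWords d p, st.2.1 ++ [(st.2.2, p)], st.2.2 + ((pvWords d p).length : Int)) := by
  unfold pvStepA pvWords
  by_cases h : PySem.Str.strip ((d.get? p).getD "") = ""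
  · rw [if_neg (by simp [h]), h]
    rw [show PySem.Str.split₀ "" = [] from by decide]
    simp
  · rw [if_pos h]

-- A's whole loop, characterised over an arbitrary key list and initial state:
-- tokens extend by the concatenated word lists, markers by the zip of exclusive prefix positions with the keys
lemma pvLoop_eq (d : PySem.Dict Int String) (ks : List Int)
    (ft : List String) (mk : List (Int × Int)) (pos : Int) :
    ks.foldl (pvStepA d) (ft, mk, pos)
    = (ft ++ ks.flatMap (pvWords d),
       mk ++ (pvPrefixPositions (ks.map (fun p => ((pvWords d p).length : Int))) pos).zip ks,
       pos + ((ks.map (fun p => ((pvWords d p).length : Int))).sum)) := by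
  induction ks generalizing ft mk pos with
  | nil =>
    simp only [List.foldl_nil, List.flatMap_nil, List.append_nil, List.map_nil,
      List.sum_nil, pvPrefixPositions, List.zip_nil_right, add_zero]
  | cons p rest ih =>
    rw [List.foldl_cons, pvStep_eq, ih]
    simp only [pvPrefixPositions, List.map_cons, List.flatMap_cons, List.zip_cons_cons,
      List.sum_cons, List.append_assoc, List.singleton_append, Prod.mk.injEq]
    exact ⟨trivial, trivial, by ring⟩

-- ===== VERDICT (by name: the statement is the Claim_ definition above) =====
theorem build_full_tokens_and_markers_py_spec : Claim_equal_build_full_tokens_and_markers_py := by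
  intro pages _
  show _ = _
  unfold build_full_tokens_and_markers_py build_full_tokens_and_markers_py_alt
  rw [pvLoop_eq]
  simp only [List.nil_append, List.map_map, List.flatMap_map, Function.comp_def, pvWords]
  rfl
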